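-- pv_equiv track=rewrite | github.com/zejiran/python-for-cats | !awesome_challenges/challenges_vol3.py | escala_musical
-- ===== SOURCE A (Python) =====
-- def escala_musical(notas: list) -> str:
--     """ Escalas musicales
--     Parámetros:
--       notas (list): Lista de enteros que representan notas musicales en Hertz
--     Retorno:
--       str: Mensaje que indique si encontró notas similares: "No hay coincidencia", "Hay una nota idéntica" o
--            "Hay una nota en otra escala". En caso que haya idénticas y en otra escala, primará retornar el
--            mensaje que informe sobre la idéntica.
--     """
--     coincidencia = 0
--     misma_escala = False
--     nota = 0
--     while nota < len(notas) and not misma_escala: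
--         nota_a_comparar = nota + 1
--         while nota_a_comparar < len(notas) and not misma_escala:
--             if notas[nota] == notas[nota_a_comparar]:
--                 coincidencia += 1
--                 misma_escala = True
--             elif notas[nota_a_comparar] % notas[nota] == 0 or notas[nota] % notas[nota_a_comparar] == 0:
--                 coincidencia += 1
--             nota_a_comparar += 1
--         nota += 1
--     if coincidencia >= 1 and misma_escala:
--         coincidencia = "Hay una nota idéntica"
--     elif coincidencia >= 1:
--         coincidencia = "Hay una nota en otra escala"
--     else:
--         coincidencia = "No hay coincidencia"
--     return coincidencia
-- ===== SOURCE B (Python) =====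
-- def escala_musical(notas: list) -> str:
--     seen = set()
--     for x in notas:
--         if x in seen:
--             return "Hay una nota idéntica"
--         seen.add(x)
--     if len(notas) > 1 and 0 in seen:
--         return "Hay una nota en otra escala"
--     vals = sorted(notas, key=abs)
--     for i, a in enumerate(vals):
--         for b in vals[i + 1:]:
--             if b % a == 0:
--                 return "Hay una nota en otra escala"
--     return "No hay coincidencia"
-- ===== Notes on version B (the rewrite author's own statement) =====
-- stated objective: faster
-- what changed: Replaces A's fused nested while-loops (which keep scanning all pairs until an identical pair) by three phases with early returns: a one-pass set-based duplicate scan, an O(n) zero shortcut, and a scan over the values sorted by absolute value that stops at the first one-directional modulo hit, so any input containing a duplicate or divisibility pair finishes after the sort instead of A's quadratic scan.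
-- crash fix: On lists where the pair scan reaches a 0 divisor before any identical pair (a 0 followed by a nonzero value, no equal pair earlier in scan order) A raises ZeroDivisionError; B returns the normal message its three phases produce. — e.g. on escala_musical([0, 1]): A raises ZeroDivisionError, B returns "Hay una nota en otra escala"
import Mathlib
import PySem

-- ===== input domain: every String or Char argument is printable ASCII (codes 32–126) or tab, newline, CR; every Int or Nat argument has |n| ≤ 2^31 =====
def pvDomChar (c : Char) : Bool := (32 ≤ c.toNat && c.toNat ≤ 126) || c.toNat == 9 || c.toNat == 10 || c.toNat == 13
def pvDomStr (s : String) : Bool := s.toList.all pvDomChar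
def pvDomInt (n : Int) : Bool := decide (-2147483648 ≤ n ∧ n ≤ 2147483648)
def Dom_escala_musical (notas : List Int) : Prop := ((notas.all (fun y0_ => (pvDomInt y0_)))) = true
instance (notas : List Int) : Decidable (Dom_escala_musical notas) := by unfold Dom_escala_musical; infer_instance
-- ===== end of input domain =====

-- B rewrites A as three phases (set-based duplicate scan, zero shortcut, divisibility scan over the
-- values sorted by absolute value); equivalence is about the return value (neither mutates its input).

-- ===== PORT A =====
-- inner 'while nota_a_comparar < len(notas) and not misma_escala' loop; fuel bounds the iteration count
def pvInnerA (notas : List Int) (i : Int) : Nat → Int → Int → Bool → Int × Bool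
  | 0, _, c, m => (c, m)
  | fuel+1, j, c, m =>
    if j < PySem.List.len notas ∧ m = false then
      if PySem.List.pyGetD notas i 0 = PySem.List.pyGetD notas j 0 then
        pvInnerA notas i fuel (j+1) (c+1) true
      else if PySem.Int.mod (PySem.List.pyGetD notas j 0) (PySem.List.pyGetD notas i 0) == 0
              || PySem.Int.mod (PySem.List.pyGetD notas i 0) (PySem.List.pyGetD notas j 0) == 0 then
        pvInnerA notas i fuel (j+1) (c+1) m
      else
        pvInnerA notas i fuel (j+1) c m
    else (c, m)

-- outer 'while nota < len(notas) and not misma_escala' loop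
def pvOuterA (notas : List Int) : Nat → Int → Int → Bool → Int × Bool
  | 0, _, c, m => (c, m)
  | fuel+1, i, c, m =>
    if i < PySem.List.len notas ∧ m = false then
      let r := pvInnerA notas i (notas.length + 1) (i+1) c m
      pvOuterA notas fuel (i+1) r.1 r.2
    else (c, m)

def escala_musical (notas : List Int) : String :=
  let r := pvOuterA notas (notas.length + 1) 0 0 false
  if 1 ≤ r.1 ∧ r.2 = true then "Hay una nota idéntica"
  else if 1 ≤ r.1 then "Hay una nota en otra escala"
  else "No hay coincidencia"

-- ===== PORT B =====
-- 'for x in notas: if x in seen: return …; seen.add(x)' — none means the early dup return fired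
def pvDupScanB : List Int → PySem.Set Int → Option (PySem.Set Int)
  | [], seen => some seen
  | x :: rest, seen =>
    if PySem.Set.contains seen x then none
    else pvDupScanB rest (PySem.Set.add seen x)

-- 'for i, a in enumerate(vals): for b in vals[i+1:]: if b % a == 0: return …'
def pvDivScanB : List Int → Bool
  | [] => false
  | a :: rest => rest.any (fun b => PySem.Int.mod b a == 0) || pvDivScanB rest

def escala_musical_alt (notas : List Int) : String :=
  match pvDupScanB notas PySem.Set.empty with
  | none => "Hay una nota idéntica"
  | some seen =>
    if 1 < PySem.List.len notas ∧ PySem.Set.contains seen 0 = true then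
      "Hay una nota en otra escala"
    else
      if pvDivScanB (PySem.List.sorted notas (fun x => |x|)) then "Hay una nota en otra escala"
      else "No hay coincidencia"

-- ===== PRECONDITION & SPEC =====
-- Exactly on these inputs A's pair scan reaches a 0 divisor before any identical pair (a 0 at position
-- i followed by a nonzero value, no equal pair lexicographically earlier) and A raises
-- ZeroDivisionError while B returns a normal message (see the raises claim below).
def Raises_escala_musical (notas : List Int) : Prop :=
  ∃ i ∈ List.range notas.length, ∃ j ∈ List.range notas.length, i < j ∧
    notas.getD i 0 = 0 ∧ notas.getD j 0 ≠ 0 ∧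
    ∀ p ∈ List.range notas.length, ∀ q ∈ List.range notas.length, p < q →
      (p < i ∨ (p = i ∧ q < j)) → notas.getD p 0 ≠ notas.getD q 0
instance (notas : List Int) : Decidable (Raises_escala_musical notas) := by
  unfold Raises_escala_musical; infer_instance

-- Pre_ excludes exactly the inputs on which A raises ZeroDivisionError (the region Raises_ above).
def Pre_escala_musical (notas : List Int) : Prop :=
  ¬ Raises_escala_musical notas
instance (notas : List Int) : Decidable (Pre_escala_musical notas) := by
  unfold Pre_escala_musical; infer_instance

def pvWitness_escala_musical : List Int := [2, 3]

def pvRaiseWitness_escala_musical : List Int := [0, 1]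
def pvRaiseWitnessOut_escala_musical : String := "Hay una nota en otra escala"

def Spec_escala_musical (notas : List Int) (out : String) : Prop := out = escala_musical_alt notas
instance (notas : List Int) (out : String) : Decidable (Spec_escala_musical notas out) := by
  unfold Spec_escala_musical; infer_instance

-- ===== CLAIM (what is proved, stated in full; the proofs are below) =====
def Claim_equal_escala_musical : Prop := ∀ (notas : List Int), Dom_escala_musical notas → Pre_escala_musical notas → Spec_escala_musical notas (escala_musical notas)

def Claim_raises_escala_musical : Prop := (∀ (notas : List Int), Dom_escala_musical notas → Raises_escala_musical notas → ¬ Pre_escala_musical notas) ∧ (Dom_escala_musical (pvRaiseWitness_escala_musical) ∧ Raises_escala_musical (pvRaiseWitness_escala_musical) ∧ escala_musical_alt (pvRaiseWitness_escala_musical) = pvRaiseWitnessOut_escala_musical)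

-- ===== LEMMAS AND PROOFS =====

-- the two modulo tests A makes on a pair, as one predicate
def pvRdir (a b : Int) : Bool := PySem.Int.mod b a == 0 || PySem.Int.mod a b == 0

-- list-structured model of A's inner loop (scans the tail after position i)
def pvInnerL (vi : Int) : List Int → Int → Bool → Int × Bool
  | [], c, m => (c, m)
  | b :: rest, c, m =>
    if m then (c, m)
    else if vi = b then pvInnerL vi rest (c+1) true
    else if pvRdir vi b then pvInnerL vi rest (c+1) m
    else pvInnerL vi rest c m

-- list-structured model of A's outer loop
def pvOuterL : List Int → Int → Bool → Int × Bool
  | [], c, m => (c, m)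
  | a :: rest, c, m =>
    if m then (c, m)
    else
      let r := pvInnerL a rest c m
      pvOuterL rest r.1 r.2

-- number of divisibility hits A counts on a duplicate-free list
def pvDivCount : List Int → Nat
  | [] => 0
  | a :: rest => rest.countP (pvRdir a) + pvDivCount rest

-- the common semantic core: some pair of distinct values divides
def pvHasDiv (l : List Int) : Prop := ∃ x ∈ l, ∃ y ∈ l, x ≠ y ∧ x ∣ y

theorem pvInnerL_true (vi : Int) (xs : List Int) (c : Int) :
    pvInnerL vi xs c true = (c, true) := by
  cases xs <;> simp [pvInnerL]

theorem pvInnerL_snd (vi : Int) (xs : List Int) (c : Int) :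
    (pvInnerL vi xs c false).2 = decide (vi ∈ xs) := by
  induction xs generalizing c with
  | nil => simp [pvInnerL]
  | cons b rest ih =>
    by_cases h : vi = b
    · simp [pvInnerL, h, pvInnerL_true]
    · by_cases h2 : pvRdir vi b <;> simp [pvInnerL, h, h2, ih]

theorem pvInnerL_mem (vi : Int) (xs : List Int) (c : Int) (h : vi ∈ xs) (hc : 0 ≤ c) :
    1 ≤ (pvInnerL vi xs c false).1 := by
  induction xs generalizing c with
  | nil => simp at h
  | cons b rest ih =>
    by_cases hb : vi = b
    · simp [pvInnerL, hb, pvInnerL_true]; omega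
    · have hm : vi ∈ rest := by rcases List.mem_cons.1 h with h' | h'; exact absurd h' hb; exact h'
      by_cases h2 : pvRdir vi b
      · simpa [pvInnerL, hb, h2] using ih (c+1) hm (by omega)
      · simpa [pvInnerL, hb, h2] using ih c hm hc

theorem pvInnerL_notmem (vi : Int) (xs : List Int) (c : Int) (h : vi ∉ xs) :
    pvInnerL vi xs c false = (c + (xs.countP (pvRdir vi) : Int), false) := by
  induction xs generalizing c with
  | nil => simp [pvInnerL]
  | cons b rest ih =>
    have hb : vi ≠ b := fun e => h (by simp [e])
    have hr : vi ∉ rest := fun e => h (by simp [e])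
    by_cases h2 : pvRdir vi b
    · rw [show pvInnerL vi (b :: rest) c false = pvInnerL vi rest (c+1) false by simp [pvInnerL, hb, h2]]
      rw [ih (c+1) hr]
      simp [h2]; ring
    · rw [show pvInnerL vi (b :: rest) c false = pvInnerL vi rest c false by simp [pvInnerL, hb, h2]]
      rw [ih c hr]
      simp [h2]

theorem pvInnerA_eq (notas : List Int) (i : Int) :
    ∀ (fuel jn : Nat) (c : Int) (m : Bool), notas.length ≤ fuel + jn →
      pvInnerA notas i fuel (jn : Int) c m
        = pvInnerL (PySem.List.pyGetD notas i 0) (notas.drop jn) c m := by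
  intro fuel
  induction fuel with
  | zero =>
    intro jn c m hf
    rw [List.drop_eq_nil_of_le (by omega)]
    cases m <;> simp [pvInnerA, pvInnerL]
  | succ fuel ih =>
    intro jn c m hf
    cases m with
    | true =>
      rw [pvInnerL_true]
      simp [pvInnerA]
    | false =>
      by_cases hj : jn < notas.length
      · have hdrop : notas.drop jn = notas[jn] :: notas.drop (jn + 1) :=
          List.drop_eq_getElem_cons hj
        have hget : PySem.List.pyGetD notas (jn : Int) 0 = notas[jn] := by
          rw [PySem.List.pyGetD_natCast]
          exact List.getD_eq_getElem notas 0 hj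
        have hcast : (jn : Int) + 1 = ((jn + 1 : Nat) : Int) := by push_cast; ring
        rw [hdrop]
        show (if (jn : Int) < PySem.List.len notas ∧ false = false then _ else _) = _
        rw [if_pos ⟨by simpa [PySem.List.len_eq] using (by exact_mod_cast hj : (jn:Int) < (notas.length:Int)), rfl⟩]
        rw [hget]
        simp only [pvInnerL, if_neg (by simp : ¬ (false = true))]
        by_cases he : PySem.List.pyGetD notas i 0 = notas[jn]
        · rw [if_pos he, if_pos he, hcast, ih (jn+1) (c+1) true (by omega), pvInnerL_true]
        · rw [if_neg he, if_neg he]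
          by_cases hr : pvRdir (PySem.List.pyGetD notas i 0) notas[jn]
          · rw [if_pos (by simpa [pvRdir] using hr), if_pos hr, hcast, ih (jn+1) (c+1) false (by omega)]
          · rw [if_neg (by simpa [pvRdir] using hr), if_neg hr, hcast, ih (jn+1) c false (by omega)]
      · rw [List.drop_eq_nil_of_le (by omega)]
        show (if (jn : Int) < PySem.List.len notas ∧ false = false then _ else _) = _
        rw [if_neg (by simp [PySem.List.len_eq]; omega)]
        simp [pvInnerL]

theorem pvOuterA_eq (notas : List Int) :
    ∀ (fuel inn : Nat) (c : Int) (m : Bool), notas.length ≤ fuel + inn →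
      pvOuterA notas fuel (inn : Int) c m = pvOuterL (notas.drop inn) c m := by
  intro fuel
  induction fuel with
  | zero =>
    intro inn c m hf
    rw [List.drop_eq_nil_of_le (by omega)]
    cases m <;> simp [pvOuterA, pvOuterL]
  | succ fuel ih =>
    intro inn c m hf
    cases m with
    | true =>
      have : pvOuterL (notas.drop inn) c true = (c, true) := by
        cases notas.drop inn <;> simp [pvOuterL]
      rw [this]
      simp [pvOuterA]
    | false =>
      by_cases hi : inn < notas.length
      · have hdrop : notas.drop inn = notas[inn] :: notas.drop (inn + 1) :=
          List.drop_eq_getElem_cons hi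
        have hget : PySem.List.pyGetD notas (inn : Int) 0 = notas[inn] := by
          rw [PySem.List.pyGetD_natCast]
          exact List.getD_eq_getElem notas 0 hi
        have hcast : (inn : Int) + 1 = ((inn + 1 : Nat) : Int) := by push_cast; ring
        show (if (inn : Int) < PySem.List.len notas ∧ false = false then _ else _) = _
        rw [if_pos ⟨by simpa [PySem.List.len_eq] using (by exact_mod_cast hi : (inn:Int) < (notas.length:Int)), rfl⟩]
        simp only
        rw [hcast, pvInnerA_eq notas (inn : Int) (notas.length + 1) (inn+1) c false (by omega), hget]
        rw [ih (inn+1) _ _ (by omega)]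
        rw [hdrop]
        simp only [pvOuterL, if_neg (by simp : ¬ (false = true))]
      · rw [List.drop_eq_nil_of_le (by omega)]
        show (if (inn : Int) < PySem.List.len notas ∧ false = false then _ else _) = _
        rw [if_neg (by simp [PySem.List.len_eq]; omega)]
        simp [pvOuterL]

theorem pvOuterL_true (xs : List Int) (c : Int) : pvOuterL xs c true = (c, true) := by
  cases xs <;> simp [pvOuterL]

theorem pvOuterL_nodup (xs : List Int) (c : Int) (h : xs.Nodup) :
    pvOuterL xs c false = (c + (pvDivCount xs : Int), false) := by
  induction xs generalizing c with
  | nil => simp [pvOuterL, pvDivCount]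
  | cons a rest ih =>
    rcases List.nodup_cons.1 h with ⟨ha, hr⟩
    have e1 : pvOuterL (a :: rest) c false = pvOuterL rest (pvInnerL a rest c false).1 (pvInnerL a rest c false).2 := rfl
    rw [e1, pvInnerL_notmem a rest c ha]
    rw [ih _ hr]
    simp [pvDivCount]; ring

theorem pvOuterL_dup (xs : List Int) (c : Int) (h : ¬ xs.Nodup) (hc : 0 ≤ c) :
    (pvOuterL xs c false).2 = true ∧ 1 ≤ (pvOuterL xs c false).1 := by
  induction xs generalizing c with
  | nil => simp [List.nodup_nil] at h
  | cons a rest ih =>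
    have e1 : pvOuterL (a :: rest) c false = pvOuterL rest (pvInnerL a rest c false).1 (pvInnerL a rest c false).2 := rfl
    rw [e1]
    by_cases ha : a ∈ rest
    · have h2 : (pvInnerL a rest c false).2 = true := by rw [pvInnerL_snd]; simpa
      have h1 := pvInnerL_mem a rest c ha hc
      rw [h2, pvOuterL_true]
      exact ⟨rfl, h1⟩
    · have hr : ¬ rest.Nodup := fun hn => h (List.nodup_cons.2 ⟨ha, hn⟩)
      rw [pvInnerL_notmem a rest c ha]
      simp only
      exact ih _ hr (by positivity)

theorem pvHasDiv_cons (a : Int) (rest : List Int) (ha : a ∉ rest) :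
    pvHasDiv (a :: rest) ↔ (∃ b ∈ rest, (a ∣ b ∨ b ∣ a)) ∨ pvHasDiv rest := by
  constructor
  · rintro ⟨x, hx, y, hy, hne, hdvd⟩
    rcases List.mem_cons.1 hx with hxa | hx
    · rcases List.mem_cons.1 hy with hya | hy
      · exact absurd (hxa.trans hya.symm) hne
      · exact Or.inl ⟨y, hy, Or.inl (by rw [← hxa]; exact hdvd)⟩
    · rcases List.mem_cons.1 hy with hya | hy
      · exact Or.inl ⟨x, hx, Or.inr (by rw [← hya]; exact hdvd)⟩
      · exact Or.inr ⟨x, hx, y, hy, hne, hdvd⟩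
  · rintro (⟨b, hb, hd | hd⟩ | ⟨x, hx, y, hy, hne, hd⟩)
    · exact ⟨a, List.mem_cons_self, b, List.mem_cons_of_mem _ hb, fun e => ha (e ▸ hb), hd⟩
    · exact ⟨b, List.mem_cons_of_mem _ hb, a, List.mem_cons_self, fun e => ha (e ▸ hb), hd⟩
    · exact ⟨x, List.mem_cons_of_mem _ hx, y, List.mem_cons_of_mem _ hy, hne, hd⟩

theorem pvDivCount_pos (l : List Int) (h : l.Nodup) :
    0 < pvDivCount l ↔ pvHasDiv l := by
  induction l with
  | nil => simp [pvDivCount, pvHasDiv]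
  | cons a rest ih =>
    rcases List.nodup_cons.1 h with ⟨ha, hr⟩
    rw [pvHasDiv_cons a rest ha, ← ih hr]
    have hcount : (0 < rest.countP (pvRdir a)) ↔ ∃ b ∈ rest, pvRdir a b := by
      rw [List.countP_pos_iff]
    constructor
    · intro hp
      rcases Nat.lt_or_ge 0 (rest.countP (pvRdir a)) with hcp | hcp
      · rcases hcount.1 hcp with ⟨b, hb, hdb⟩
        exact Or.inl ⟨b, hb, by simpa [pvRdir, PySem.Int.mod_eq_zero_iff_dvd] using hdb⟩
      · refine Or.inr ?_
        have h1 : pvDivCount (a :: rest) = rest.countP (pvRdir a) + pvDivCount rest := rfl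
        omega
    · rintro (⟨b, hb, hd⟩ | hp)
      · have : 0 < rest.countP (pvRdir a) := hcount.2 ⟨b, hb, by simpa [pvRdir, PySem.Int.mod_eq_zero_iff_dvd]⟩
        have h1 : pvDivCount (a :: rest) = rest.countP (pvRdir a) + pvDivCount rest := rfl
        omega
      · have h1 : pvDivCount (a :: rest) = rest.countP (pvRdir a) + pvDivCount rest := rfl
        omega

theorem pvDivScanB_false_iff (l : List Int) :
    pvDivScanB l = false ↔ l.Pairwise (fun a b => ¬ a ∣ b) := by
  induction l with
  | nil => simp [pvDivScanB]
  | cons a rest ih =>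
    simp [pvDivScanB, ih, List.pairwise_cons, PySem.Int.mod_eq_zero_iff_dvd]

theorem pvContains_ofList (pre : List Int) (x : Int) :
    PySem.Set.contains (PySem.Set.ofList pre) x = decide (x ∈ pre) := by
  by_cases hx : x ∈ pre <;> simp [hx]

theorem pvDupScanB_some (l : List Int) : ∀ (pre : List Int), (pre ++ l).Nodup →
    pvDupScanB l (PySem.Set.ofList pre) = some (PySem.Set.ofList (pre ++ l)) := by
  induction l with
  | nil => intro pre h; simp [pvDupScanB]
  | cons x rest ih =>
    intro pre h
    have hx : x ∉ pre := fun hxp => (List.nodup_append.1 h).2.2 x hxp x List.mem_cons_self rfl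
    have e1 : pvDupScanB (x :: rest) (PySem.Set.ofList pre)
        = if PySem.Set.contains (PySem.Set.ofList pre) x then none
          else pvDupScanB rest (PySem.Set.add (PySem.Set.ofList pre) x) := rfl
    rw [e1, pvContains_ofList]
    simp only [hx, decide_false, Bool.false_eq_true, if_false]
    rw [Eq.symm (PySem.Set.ofList_append_singleton pre x)]
    have hassoc : pre ++ x :: rest = (pre ++ [x]) ++ rest := by simp
    rw [ih (pre ++ [x]) (by rwa [hassoc] at h), hassoc]

theorem pvDupScanB_none (l : List Int) : ∀ (pre : List Int), pre.Nodup → ¬ (pre ++ l).Nodup →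
    pvDupScanB l (PySem.Set.ofList pre) = none := by
  induction l with
  | nil => intro pre hp h; simp at h; exact absurd hp h
  | cons x rest ih =>
    intro pre hp h
    have e1 : pvDupScanB (x :: rest) (PySem.Set.ofList pre)
        = if PySem.Set.contains (PySem.Set.ofList pre) x then none
          else pvDupScanB rest (PySem.Set.add (PySem.Set.ofList pre) x) := rfl
    by_cases hx : x ∈ pre
    · rw [e1, pvContains_ofList]
      simp [hx]
    · rw [e1, pvContains_ofList]
      simp only [hx, decide_false, Bool.false_eq_true, if_false]
      rw [Eq.symm (PySem.Set.ofList_append_singleton pre x)]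
      apply ih (pre ++ [x])
      · refine List.nodup_append.2 ⟨hp, List.nodup_singleton x, ?_⟩
        intro a ha b hb
        rw [List.mem_singleton.1 hb]
        exact fun e => hx (e ▸ ha)
      · have hassoc : pre ++ x :: rest = (pre ++ [x]) ++ rest := by simp
        rwa [hassoc] at h

theorem pvLen_le_one (l : List Int) (h0 : ∀ x ∈ l, x = 0) (h : l.Nodup) : l.length ≤ 1 := by
  cases l with
  | nil => simp
  | cons a t =>
    cases t with
    | nil => simp
    | cons b u =>
      have ha : a = 0 := h0 a (by simp)
      have hb : b = 0 := h0 b (by simp)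
      rcases List.nodup_cons.1 h with ⟨hna, _⟩
      exact absurd (by simp [ha, hb]) hna

theorem pvOne_lt_length (l : List Int) (x y : Int) (hx : x ∈ l) (hy : y ∈ l) (hne : x ≠ y) :
    1 < l.length := by
  cases l with
  | nil => simp at hx
  | cons a t =>
    cases t with
    | nil => simp_all
    | cons b u => simp

theorem pvDivScan_sorted_iff (notas : List Int) (hnd : notas.Nodup)
    (hz : ¬ (1 < notas.length ∧ 0 ∈ notas)) :
    pvDivScanB (PySem.List.sorted notas (fun x => |x|)) = true ↔ pvHasDiv notas := by
  set vals := PySem.List.sorted notas (fun x => |x|) with hv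
  have hperm := PySem.List.sorted_perm notas (fun x => |x|) false
  have hndv : vals.Nodup := hperm.nodup_iff.2 hnd
  have hmem : ∀ z : Int, z ∈ vals ↔ z ∈ notas := fun z => hperm.mem_iff
  have hiff : pvDivScanB vals = true ↔ ¬ vals.Pairwise (fun a b => ¬ a ∣ b) := by
    rw [← pvDivScanB_false_iff]
    cases pvDivScanB vals <;> simp
  rw [hiff]
  constructor
  · intro hnp
    rw [List.pairwise_iff_getElem] at hnp
    push Not at hnp
    obtain ⟨p, q, hp, hq, hpq, hd⟩ := hnp
    refine ⟨vals[p], (hmem _).1 (List.getElem_mem hp), vals[q], (hmem _).1 (List.getElem_mem hq), ?_, hd⟩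
    intro e
    exact absurd ((List.Nodup.getElem_inj_iff hndv).1 e) (by omega)
  · rintro ⟨x, hx, y, hy, hne, hd⟩
    intro hpw
    have hy0 : y ≠ 0 := by
      rintro rfl
      exact hz ⟨pvOne_lt_length notas x 0 hx hy hne, hy⟩
    have habs : |x| ≤ |y| := Int.le_of_dvd (abs_pos.2 hy0) ((abs_dvd _ _).2 ((dvd_abs _ _).2 hd))
    obtain ⟨p, hp, hvp⟩ := List.getElem_of_mem ((hmem x).2 hx)
    obtain ⟨q, hq, hvq⟩ := List.getElem_of_mem ((hmem y).2 hy)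
    have hpqne : p ≠ q := by
      intro e
      subst e
      exact hne (hvp.symm.trans hvq)
    have hkey := PySem.List.sorted_pairwise notas (fun x => |x|)
    rw [List.pairwise_iff_getElem] at hpw hkey
    rcases Nat.lt_or_ge p q with h | h
    · exact (hpw p q hp hq h) (by rw [hvp, hvq]; exact hd)
    · have hqp : q < p := by omega
      have h1 : |vals[q]| ≤ |vals[p]| := hkey q p hq hp hqp
      rw [hvp, hvq] at h1
      have : |x| = |y| := le_antisymm habs h1
      rcases abs_eq_abs.1 this with e | e
      · exact hne e
      · exact (hpw q p hq hp hqp) (by rw [hvp, hvq]; exact Dvd.intro (-1) (by linarith))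

theorem pvMain (notas : List Int) : escala_musical notas = escala_musical_alt notas := by
  have hOA : pvOuterA notas (notas.length + 1) 0 0 false = pvOuterL notas 0 false := by
    have h := pvOuterA_eq notas (notas.length + 1) 0 0 false (by omega)
    simpa using h
  have hempty : (PySem.Set.empty : PySem.Set Int) = PySem.Set.ofList [] := rfl
  by_cases hnd : notas.Nodup
  · -- no duplicate
    have hB1 : pvDupScanB notas PySem.Set.empty = some (PySem.Set.ofList notas) := by
      rw [hempty]
      simpa using pvDupScanB_some notas [] (by simpa)
    have hOL := pvOuterL_nodup notas 0 hnd
    have hA : escala_musical notas =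
        (if 1 ≤ (pvDivCount notas : Int) then "Hay una nota en otra escala"
         else "No hay coincidencia") := by
      unfold escala_musical
      rw [hOA, hOL]
      simp
    have hB : escala_musical_alt notas =
        (if 1 < notas.length ∧ (0:Int) ∈ notas then "Hay una nota en otra escala"
         else if pvDivScanB (PySem.List.sorted notas (fun x => |x|)) then "Hay una nota en otra escala"
         else "No hay coincidencia") := by
      unfold escala_musical_alt
      rw [hB1]
      simp
    rw [hA, hB]
    by_cases hz : 1 < notas.length ∧ (0:Int) ∈ notas
    · rw [if_pos hz]
      have hx : ∃ x ∈ notas, x ≠ 0 := by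
        by_contra hc
        push Not at hc
        have := pvLen_le_one notas hc hnd
        omega
      obtain ⟨x, hxm, hx0⟩ := hx
      have hpos : 0 < pvDivCount notas :=
        (pvDivCount_pos notas hnd).2 ⟨x, hxm, 0, hz.2, hx0, dvd_zero x⟩
      rw [if_pos (by exact_mod_cast hpos)]
    · rw [if_neg hz]
      by_cases hdv : pvHasDiv notas
      · rw [if_pos ((pvDivScan_sorted_iff notas hnd hz).2 hdv)]
        have hpos : 0 < pvDivCount notas := (pvDivCount_pos notas hnd).2 hdv
        rw [if_pos (by exact_mod_cast hpos)]
      · have hb : pvDivScanB (PySem.List.sorted notas (fun x => |x|)) = false := by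
          rcases Bool.eq_false_or_eq_true (pvDivScanB (PySem.List.sorted notas (fun x => |x|))) with h | h
          · exact absurd ((pvDivScan_sorted_iff notas hnd hz).1 h) hdv
          · exact h
        rw [hb]
        have hpos : ¬ 0 < pvDivCount notas := fun h => hdv ((pvDivCount_pos notas hnd).1 h)
        rw [if_neg (by exact_mod_cast hpos)]
        simp
  · -- duplicate exists
    have hB1 : pvDupScanB notas PySem.Set.empty = none := by
      rw [hempty, pvDupScanB_none notas [] List.nodup_nil (by simpa)]
    obtain ⟨h2, h1⟩ := pvOuterL_dup notas 0 hnd le_rfl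
    unfold escala_musical escala_musical_alt
    rw [hOA, hB1]
    simp only
    rw [if_pos ⟨h1, h2⟩]

-- ===== VERDICT (by name: the statement is the Claim_ definition above) =====
theorem escala_musical_spec : Claim_equal_escala_musical := by
  intro notas _ _
  unfold Spec_escala_musical
  exact pvMain notas

theorem escala_musical_raises : Claim_raises_escala_musical := by
  unfold Claim_raises_escala_musical
  refine ⟨fun notas _ hr hpre => hpre hr, by decide, by decide, by decide⟩

-- self-check: the raise-witness input is indeed excluded by Pre_
theorem pvRaiseWitness_ok : ¬ Pre_escala_musical pvRaiseWitness_escala_musical :=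
  escala_musical_raises.1 pvRaiseWitness_escala_musical escala_musical_raises.2.1
    escala_musical_raises.2.2.1
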